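-- pv_equiv track=rewrite | github.com/LEE-sh1673/Algorithm-Study | algorithm_basic_2/lecture_500/problems/boj_2085/main.py | check
-- ===== SOURCE A (Python) =====
-- def check(A: list) -> int:
--     n = len(A)
--     ans = 1
--
--     for i in range(n):
--         cnt = 1
--         for j in range(1, n):  # visited with i-row
--             if A[i][j] == A[i][j - 1]:
--                 cnt += 1
--             else:
--                 cnt = 1
--             ans = max(ans, cnt)
--
--         cnt = 1
--         for j in range(1, n):  # visited with i-column
--             if A[j][i] == A[j - 1][i]:
--                 cnt += 1
--             else:
--                 cnt = 1
--             ans = max(ans, cnt)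
--     return ans
-- ===== SOURCE B (Python) =====
-- def check(A: list) -> int:
--     # The board is the n-by-n square, n = len(A).  Scan its rows together with
--     # its columns (via transpose) uniformly, splitting each line into maximal
--     # runs of equal values with a two-pointer group scan.
--     n = len(A)
--     board = [row[:n] for row in A]
--     lines = board + [list(col) for col in zip(*board)]
--     best = 1
--     for line in lines:
--         while line:
--             k = 1
--             while k < len(line) and line[k] == line[0]:
--                 k += 1
--             best = max(best, k)
--             line = line[k:]
--     return best
-- ===== Notes on version B (the rewrite author's own statement) =====
-- stated objective: idiomatic
-- what changed: Instead of two index-based counter loops per i over an implicit n-by-n window, B materialises the lines to scan (the rows of the clipped n-by-n board plus its columns obtained by transposing with zip(*board)) and processes them uniformly, splitting each line into maximal runs of equal values with a two-pointer group scan.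
import Mathlib
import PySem

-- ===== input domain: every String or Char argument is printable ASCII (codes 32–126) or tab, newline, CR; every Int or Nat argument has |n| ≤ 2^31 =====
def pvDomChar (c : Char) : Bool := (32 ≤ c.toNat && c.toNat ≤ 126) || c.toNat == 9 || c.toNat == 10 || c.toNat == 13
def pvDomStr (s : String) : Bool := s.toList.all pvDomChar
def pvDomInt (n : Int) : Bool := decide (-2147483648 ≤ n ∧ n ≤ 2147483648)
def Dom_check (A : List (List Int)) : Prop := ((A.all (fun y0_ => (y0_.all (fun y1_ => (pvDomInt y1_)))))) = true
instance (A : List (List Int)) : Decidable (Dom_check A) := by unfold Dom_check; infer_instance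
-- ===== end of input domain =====

-- B differs from A in decomposition only (rows+transposed columns scanned uniformly); equivalence is about the return value (neither mutates A).

-- ===== PORT A =====
-- A[i][j] (indices always non-negative and in range under Pre_check; total form of pyGet? under that precondition)
def aGet (A : List (List Int)) (i j : Int) : Int :=
  PySem.List.pyGetD (PySem.List.pyGetD A i []) j 0

def check (A : List (List Int)) : Int :=
  let n : Int := PySem.List.len A
  (PySem.List.pyRange 0 n 1).foldl (fun ans i =>
    -- for j in range(1, n): row i, running counter cnt
    let p1 := (PySem.List.pyRange 1 n 1).foldl (fun (p : Int × Int) j =>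
        let cnt := if aGet A i j = aGet A i (j - 1) then p.2 + 1 else 1
        (max p.1 cnt, cnt)) (ans, 1)
    -- for j in range(1, n): column i, running counter cnt
    let p2 := (PySem.List.pyRange 1 n 1).foldl (fun (p : Int × Int) j =>
        let cnt := if aGet A j i = aGet A (j - 1) i then p.2 + 1 else 1
        (max p.1 cnt, cnt)) (p1.1, 1)
    p2.1) 1

-- ===== PORT B =====
-- inner `while k < len(line) and line[k] == line[0]` of Source B: length of the run of `x` at the front
def countPrefix (x : Int) : List Int → Nat
  | [] => 0
  | y :: t => if y = x then countPrefix x t + 1 else 0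

-- outer `while line:` of Source B; each iteration consumes k ≥ 1 elements, so fuel = line.length suffices
def scanGo : Nat → List Int → Int → Int
  | 0, _, best => best
  | _ + 1, [], best => best
  | fuel + 1, x :: rest, best =>
    let k := countPrefix x rest
    scanGo fuel (rest.drop k) (max best ((k : Int) + 1))

def scanLine (line : List Int) (best : Int) : Int := scanGo line.length line best

-- zip(*A): take heads while every row is non-empty; stops after at most (first row).length steps
def zipGo : Nat → List (List Int) → List (List Int)
  | 0, _ => []
  | fuel + 1, A =>
    if A ≠ [] ∧ ∀ r ∈ A, r ≠ [] then
      (A.map (fun r => r.headD 0)) :: zipGo fuel (A.map (fun r => r.drop 1))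
    else []

def zipStar (A : List (List Int)) : List (List Int) := zipGo (A.headD []).length A

def check_alt (A : List (List Int)) : Int :=
  let n := A.length
  let board := A.map (fun r => r.take n)
  let lines := board ++ zipStar board
  lines.foldl (fun best line => scanLine line best) 1

-- ===== PRECONDITION & SPEC =====
-- Pre_check excludes exactly the inputs on which A raises IndexError: some row shorter than
-- n = len(A) while n ≥ 2 (for n ≤ 1 the inner loops are empty and A returns 1 on any input).
def Pre_check (A : List (List Int)) : Prop := 2 ≤ A.length → ∀ r ∈ A, A.length ≤ r.length
instance (A : List (List Int)) : Decidable (Pre_check A) := by unfold Pre_check; infer_instance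

def pvWitness_check : List (List Int) := [[1, 2], [2, 2]]

def Spec_check (A : List (List Int)) (out : Int) : Prop := out = check_alt A
instance (A : List (List Int)) (out : Int) : Decidable (Spec_check A out) := by unfold Spec_check; infer_instance

-- ===== CLAIM (what is proved, stated in full; the proofs are below) =====
def Claim_equal_check : Prop := ∀ (A : List (List Int)), Dom_check A → Pre_check A → Spec_check A (check A)

-- ===== LEMMAS AND PROOFS =====

-- longest run of the "virtual" line whose current run (ending just before l) has value prev and length cnt
def g (prev cnt : Int) : List Int → Int
  | [] => cnt
  | x :: t => if x = prev then g x (cnt + 1) t else max cnt (g x 1 t)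

-- longest run of a line (0 for the empty line)
def M : List Int → Int
  | [] => 0
  | x :: t => g x 1 t

lemma g_ge (l : List Int) : ∀ prev cnt, cnt ≤ g prev cnt l := by
  induction l with
  | nil => intro prev cnt; simp [g]
  | cons x t ih =>
    intro prev cnt
    simp only [g]
    split
    · exact le_trans (by omega) (ih x (cnt + 1))
    · exact le_max_left _ _

lemma M_head (r : List Int) (h : r ≠ []) :
    M r = g (PySem.List.pyGetD r 0 0) 1 (r.drop 1) := by
  cases r with
  | nil => exact absurd rfl h
  | cons x t => simp [M, PySem.List.pyGetD_zero_cons]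

-- the A-side inner loop computes max ans (g (get (a-1)) cnt (line a..b-1))
lemma afold_eq (get : Int → Int) :
    ∀ (n : Nat) (a b : Int), (b - a).toNat = n → ∀ (ans cnt : Int), 1 ≤ cnt → cnt ≤ ans →
    ((PySem.List.pyRange a b 1).foldl (fun (p : Int × Int) j =>
        let c := if get j = get (j - 1) then p.2 + 1 else 1
        (max p.1 c, c)) (ans, cnt)).1
      = max ans (g (get (a - 1)) cnt ((PySem.List.pyRange a b 1).map get)) := by
  intro n
  induction n with
  | zero =>
    intro a b hab ans cnt h1 h2
    rw [PySem.List.pyRange_one_eq_nil (by omega)]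
    simp [g]; omega
  | succ n ih =>
    intro a b hab ans cnt h1 h2
    have hlt : a < b := by omega
    rw [PySem.List.pyRange_one_cons hlt]
    simp only [List.foldl_cons, List.map_cons, g]
    by_cases hc : get a = get (a - 1)
    · rw [if_pos hc, if_pos hc]
      have := ih (a + 1) b (by omega) (max ans (cnt + 1)) (cnt + 1) (by omega) (le_max_right _ _)
      simp only at this
      rw [this]
      have hge := g_ge ((PySem.List.pyRange (a + 1) b 1).map get) (get ((a + 1) - 1)) (cnt + 1)
      have : get ((a + 1) - 1) = get a := by norm_num
      rw [this] at hge ⊢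
      omega
    · rw [if_neg hc, if_neg hc]
      have := ih (a + 1) b (by omega) (max ans 1) 1 (by omega) (le_max_right _ _)
      simp only at this
      rw [this]
      have : get ((a + 1) - 1) = get a := by norm_num
      rw [this]
      omega

lemma g_drop (l : List Int) : ∀ (x c : Int), 1 ≤ c →
    g x c l = max (c + countPrefix x l) (M (l.drop (countPrefix x l))) := by
  induction l with
  | nil => intro x c hc; simp [g, countPrefix, M]; omega
  | cons z t ih =>
    intro x c hc
    by_cases hz : z = x
    · subst hz
      have hcp : countPrefix z (z :: t) = countPrefix z t + 1 := by simp [countPrefix]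
      have hg : g z c (z :: t) = g z (c + 1) t := by simp [g]
      rw [hg, ih z (c + 1) (by omega), hcp, List.drop_succ_cons]
      push_cast
      omega
    · have hcp : countPrefix x (z :: t) = 0 := by simp [countPrefix, hz]
      have hg : g x c (z :: t) = max c (g z 1 t) := by simp [g, hz]
      rw [hg, hcp]
      simp only [Nat.cast_zero, add_zero, List.drop_zero, M]

lemma scanGo_eq : ∀ (fuel : Nat) (l : List Int) (best : Int), l.length ≤ fuel → 1 ≤ best →
    scanGo fuel l best = max best (M l) := by
  intro fuel
  induction fuel with
  | zero =>
    intro l best hl hb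
    have : l = [] := by cases l <;> simp_all
    subst this; simp [scanGo, M]; omega
  | succ fuel ih =>
    intro l best hl hb
    cases l with
    | nil => simp [scanGo, M]; omega
    | cons x rest =>
      simp only [scanGo]
      rw [ih (rest.drop (countPrefix x rest)) _ (by simp at hl ⊢; omega) (by
        have := le_max_left best ((countPrefix x rest : Int) + 1); omega)]
      have hM : M (x :: rest) = max ((1 : Int) + (countPrefix x rest : Int)) (M (rest.drop (countPrefix x rest))) := by
        simp only [M]; exact g_drop rest x 1 (by omega)
      rw [hM]
      omega

lemma scanLine_eq (l : List Int) (best : Int) (hb : 1 ≤ best) :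
    scanLine l best = max best (M l) :=
  scanGo_eq l.length l best le_rfl hb

-- folding scanLine is folding the running max of M
lemma foldl_scan_eq (lines : List (List Int)) : ∀ (best : Int), 1 ≤ best →
    lines.foldl (fun b l => scanLine l b) best = lines.foldl (fun b l => max b (M l)) best := by
  induction lines with
  | nil => intro best hb; rfl
  | cons l t ih =>
    intro best hb
    simp only [List.foldl_cons]
    rw [scanLine_eq l best hb, ih (max best (M l)) (by omega)]

lemma foldl_max_start {α : Type} (f : α → Int) (l : List α) :
    ∀ (s t : Int), l.foldl (fun a i => max a (f i)) (max s t)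
      = max (l.foldl (fun a i => max a (f i)) s) t := by
  induction l with
  | nil => intro s t; rfl
  | cons x xs ih =>
    intro s t
    simp only [List.foldl_cons]
    have : max (max s t) (f x) = max (max s (f x)) t := by omega
    rw [this, ih]

lemma foldl_max_pair {α : Type} (f h : α → Int) (l : List α) :
    ∀ (s : Int), l.foldl (fun a i => max a (max (f i) (h i))) s
      = max (l.foldl (fun a i => max a (f i)) s) (l.foldl (fun a i => max a (h i)) s) := by
  induction l with
  | nil => intro s; exact (max_self s).symm
  | cons x xs ih =>
    intro s
    simp only [List.foldl_cons]
    rw [ih]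
    rw [show max s (max (f x) (h x)) = max (max s (f x)) (h x) from by omega]
    rw [foldl_max_start f xs (max s (f x)) (h x)]
    rw [show max (max s (f x)) (h x) = max (max s (h x)) (f x) from by omega]
    rw [foldl_max_start h xs (max s (h x)) (f x)]
    have h1 := (PySem.List.le_foldl_max_int xs f (max s (f x))).1
    have h2 := (PySem.List.le_foldl_max_int xs h (max s (h x))).1
    omega

-- invariant-carrying congruence for the outer fold
lemma foldl_invar_congr {α : Type} (l : List α) (f h : Int → α → Int) :
    ∀ (s : Int), 1 ≤ s → (∀ a i, 1 ≤ a → i ∈ l → f a i = h a i) → (∀ a i, 1 ≤ a → a ≤ h a i) →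
    l.foldl f s = l.foldl h s := by
  induction l with
  | nil => intro s _ _ _; rfl
  | cons x t ih =>
    intro s hs hfh hmono
    simp only [List.foldl_cons]
    rw [hfh s x hs (by simp)]
    exact ih (h s x) (le_trans hs (hmono s x hs)) (fun a i ha hi => hfh a i ha (by simp [hi]))
      hmono

-- the transpose: zipGo with enough fuel on a rectangular grid
lemma zipGo_eq : ∀ (m fuel : Nat) (A : List (List Int)), m ≤ fuel → A ≠ [] →
    (∀ r ∈ A, r.length = m) →
    zipGo fuel A = (List.range m).map (fun j => A.map (fun r => r.getD j 0)) := by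
  intro m
  induction m with
  | zero =>
    intro fuel A _ hA hrows
    cases fuel with
    | zero => rfl
    | succ fuel =>
      simp only [zipGo, List.range_zero, List.map_nil]
      rw [if_neg]
      rintro ⟨h1, h2⟩
      cases A with
      | nil => exact hA rfl
      | cons r t =>
        have := hrows r (by simp)
        have : r = [] := by simpa using this
        exact h2 r (by simp) this
  | succ m ih =>
    intro fuel A hfuel hA hrows
    cases fuel with
    | zero => omega
    | succ fuel =>
      simp only [zipGo]
      rw [if_pos ⟨hA, fun r hr => by have := hrows r hr; intro he; subst he; simp at this⟩]
      have htails : ∀ r ∈ A.map (fun r => r.drop 1), r.length = m := by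
        intro r hr
        obtain ⟨r0, hr0, rfl⟩ := List.mem_map.mp hr
        have := hrows r0 hr0; simp [this]
      rw [ih fuel (A.map (fun r => r.drop 1)) (by omega) (by simpa using hA) htails]
      rw [List.range_succ_eq_map]
      simp only [List.map_cons, List.map_map]
      congr 1
      · apply List.map_congr_left; intro r _; cases r <;> simp
      · apply List.map_congr_left
        intro j _
        simp only [Function.comp_apply, Function.comp_def]
        apply List.map_congr_left
        intro r _
        cases r <;> simp

-- longest run of row i / column i as A's inner loops see them
def Mrow (A : List (List Int)) (i : Int) : Int :=
  g (aGet A i 0) 1 ((PySem.List.pyRange 1 (PySem.List.len A) 1).map (fun j => aGet A i j))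

def Mcol (A : List (List Int)) (i : Int) : Int :=
  g (aGet A 0 i) 1 ((PySem.List.pyRange 1 (PySem.List.len A) 1).map (fun j => aGet A j i))

lemma check_eq_fold (A : List (List Int)) :
    check A = (PySem.List.pyRange 0 (PySem.List.len A) 1).foldl
      (fun ans i => max ans (max (Mrow A i) (Mcol A i))) 1 := by
  unfold check
  apply foldl_invar_congr
  · omega
  · intro a i ha _
    have h1 := afold_eq (fun j => aGet A i j) ((PySem.List.len A) - 1).toNat 1
        (PySem.List.len A) rfl a 1 le_rfl ha
    simp only [show (1 : Int) - 1 = 0 from rfl] at h1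
    have h2 := afold_eq (fun j => aGet A j i) ((PySem.List.len A) - 1).toNat 1
        (PySem.List.len A) rfl (max a (Mrow A i)) 1 le_rfl (le_trans ha (le_max_left _ _))
    simp only [show (1 : Int) - 1 = 0 from rfl] at h2
    simp only []
    rw [h1]
    rw [show max a (g (aGet A i 0) 1 ((PySem.List.pyRange 1 (PySem.List.len A) 1).map
          (fun j => aGet A i j))) = max a (Mrow A i) from rfl]
    rw [h2]
    rw [show g (aGet A 0 i) 1 ((PySem.List.pyRange 1 (PySem.List.len A) 1).map
          (fun j => aGet A j i)) = Mcol A i from rfl]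
    omega
  · intro a i ha
    omega

lemma Mrow_eq (A : List (List Int)) (hsq : ∀ r ∈ A, r.length = A.length) (i : Int)
    (h0 : 0 ≤ i) (hn : i < PySem.List.len A) :
    Mrow A i = M (PySem.List.pyGetD A i []) := by
  have hin : PySem.Raise.InRange A.length i := by
    simp only [PySem.Raise.InRange, PySem.List.len_eq] at *
    omega
  have hmem := PySem.List.pyGetD_mem A ([] : List Int) hin
  have hlenr : (PySem.List.pyGetD A i []).length = A.length := hsq _ hmem
  have hne : (PySem.List.pyGetD A i []) ≠ [] := by
    intro he
    rw [he] at hlenr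
    simp only [PySem.List.len_eq] at hn
    simp at hlenr
    omega
  rw [M_head _ hne]
  unfold Mrow
  have hlen : PySem.List.len A = PySem.List.len (PySem.List.pyGetD A i []) := by
    simp [PySem.List.len_eq, hlenr]
  rw [show (fun j => aGet A i j) = (fun j => PySem.List.pyGetD (PySem.List.pyGetD A i []) j 0) from rfl]
  rw [hlen, PySem.List.map_pyGetD_pyRange _ _ (by omega : (0:Int) ≤ 1)]
  rfl

lemma rows_eq (A : List (List Int)) (hsq : ∀ r ∈ A, r.length = A.length) :
    (PySem.List.pyRange 0 (PySem.List.len A) 1).foldl (fun a i => max a (Mrow A i)) 1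
      = A.foldl (fun a r => max a (M r)) 1 := by
  rw [PySem.List.foldl_congr_mem _ _ (fun a i => max a (M (PySem.List.pyGetD A i []))) 1
      (fun acc i hi => by
        have hm := (PySem.List.mem_pyRange_one).mp hi
        rw [Mrow_eq A hsq i hm.1 hm.2])]
  exact PySem.List.foldl_pyRange_zero_pyGetD A [] (fun a r => max a (M r)) 1

lemma colFull_eq (A : List (List Int)) (i : Int) :
    (PySem.List.pyRange 0 (PySem.List.len A) 1).map (fun j => aGet A j i)
      = A.map (fun r => PySem.List.pyGetD r i 0) := by
  rw [show (fun j => aGet A j i)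
        = ((fun r => PySem.List.pyGetD r i 0) ∘ (fun j => PySem.List.pyGetD A j [])) from rfl]
  rw [← List.map_map]
  rw [PySem.List.map_pyGetD_pyRange_zero]

lemma Mcol_eq (A : List (List Int)) (hA : A ≠ []) (i : Int) :
    Mcol A i = M (A.map (fun r => PySem.List.pyGetD r i 0)) := by
  have hpos : (0 : Int) < PySem.List.len A := by
    simp only [PySem.List.len_eq]
    cases A with
    | nil => exact absurd rfl hA
    | cons r t => simp
  have hcons := colFull_eq A i
  rw [PySem.List.pyRange_one_cons hpos, List.map_cons] at hcons
  rw [← hcons]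
  rfl

lemma cols_eq (A : List (List Int)) (hsq : ∀ r ∈ A, r.length = A.length) (hA : A ≠ []) :
    (PySem.List.pyRange 0 (PySem.List.len A) 1).foldl (fun a i => max a (Mcol A i)) 1
      = (zipStar A).foldl (fun a c => max a (M c)) 1 := by
  have hhead : (A.headD []).length = A.length := by
    apply hsq
    cases A with
    | nil => exact absurd rfl hA
    | cons r t => simp
  have hzip : zipStar A = (List.range A.length).map (fun j => A.map (fun r => r.getD j 0)) := by
    unfold zipStar
    rw [hhead]
    exact zipGo_eq A.length A.length A le_rfl hA hsq
  rw [hzip]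
  simp only [PySem.List.len_eq]
  rw [PySem.List.pyRange_zero_natCast, List.foldl_map, List.foldl_map]
  apply PySem.List.foldl_congr_mem
  intro acc j _
  rw [Mcol_eq A hA (j : Int)]
  rw [show (A.map (fun r => PySem.List.pyGetD r (j : Int) 0)) = A.map (fun r => r.getD j 0)
        from List.map_congr_left (fun r _ => by simp)]

lemma check_alt_eq (A : List (List Int)) :
    check_alt A = max ((zipStar (A.map (fun r => r.take A.length))).foldl (fun a c => max a (M c)) 1)
      ((A.map (fun r => r.take A.length)).foldl (fun a r => max a (M r)) 1) := by
  unfold check_alt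
  simp only [List.foldl_append]
  rw [foldl_scan_eq _ 1 le_rfl]
  have hR := (PySem.List.le_foldl_max_int (A.map (fun r => r.take A.length)) M 1).1
  rw [foldl_scan_eq _ _ hR]
  rw [show (A.map (fun r => r.take A.length)).foldl (fun a r => max a (M r)) 1
        = max 1 ((A.map (fun r => r.take A.length)).foldl (fun a r => max a (M r)) 1) from by omega]
  rw [foldl_max_start]
  omega

lemma aGet_take (A : List (List Int)) (hrows : ∀ r ∈ A, A.length ≤ r.length) (i j : Int)
    (hi0 : 0 ≤ i) (hi : i < PySem.List.len A) (hj0 : 0 ≤ j) (hj : j < PySem.List.len A) :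
    aGet (A.map (fun r => r.take A.length)) i j = aGet A i j := by
  simp only [PySem.List.len_eq] at hi hj
  have hi' : i.toNat < A.length := by omega
  have hj' : j.toNat < A.length := by omega
  unfold aGet
  rw [PySem.List.pyGetD_eq_getElem A [] hi0 (by simpa using hi)]
  rw [PySem.List.pyGetD_eq_getElem (A.map (fun r => r.take A.length)) [] hi0 (by simpa using hi)]
  rw [List.getElem_map]
  have hr : A.length ≤ A[i.toNat].length := hrows _ (by simp)
  rw [PySem.List.pyGetD_eq_getElem A[i.toNat] 0 hj0 (by omega)]
  rw [PySem.List.pyGetD_eq_getElem (A[i.toNat].take A.length) 0 hj0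
      (by rw [List.length_take]; push_cast; omega)]
  exact List.getElem_take

lemma Mrow_take (A : List (List Int)) (hrows : ∀ r ∈ A, A.length ≤ r.length) (i : Int)
    (hi0 : 0 ≤ i) (hi : i < PySem.List.len A) :
    Mrow (A.map (fun r => r.take A.length)) i = Mrow A i := by
  have hlen : PySem.List.len (A.map (fun r => r.take A.length)) = PySem.List.len A := by
    simp [PySem.List.len_eq]
  unfold Mrow
  rw [hlen]
  rw [aGet_take A hrows i 0 hi0 hi le_rfl (by simp only [PySem.List.len_eq] at hi ⊢; omega)]
  rw [List.map_congr_left (fun j hj => by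
    have hm := (PySem.List.mem_pyRange_one).mp hj
    exact aGet_take A hrows i j hi0 hi (by omega) hm.2)]

lemma Mcol_take (A : List (List Int)) (hrows : ∀ r ∈ A, A.length ≤ r.length) (i : Int)
    (hi0 : 0 ≤ i) (hi : i < PySem.List.len A) :
    Mcol (A.map (fun r => r.take A.length)) i = Mcol A i := by
  have hlen : PySem.List.len (A.map (fun r => r.take A.length)) = PySem.List.len A := by
    simp [PySem.List.len_eq]
  unfold Mcol
  rw [hlen]
  rw [aGet_take A hrows 0 i le_rfl (by simp only [PySem.List.len_eq] at hi ⊢; omega) hi0 hi]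
  rw [List.map_congr_left (fun j hj => by
    have hm := (PySem.List.mem_pyRange_one).mp hj
    exact aGet_take A hrows j i (by omega) hm.2 hi0 hi)]

-- the core equivalence, for any grid whose rows all have length ≥ len(A)
lemma check_eq_alt_of_rows (A : List (List Int)) (hA : A ≠ [])
    (hrows : ∀ r ∈ A, A.length ≤ r.length) : check A = check_alt A := by
  have hsq : ∀ r ∈ (A.map (fun r => r.take A.length)),
      r.length = (A.map (fun r => r.take A.length)).length := by
    intro r hr
    obtain ⟨r0, hr0, rfl⟩ := List.mem_map.mp hr
    have := hrows r0 hr0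
    simp only [List.length_take, List.length_map]
    omega
  have hWne : (A.map (fun r => r.take A.length)) ≠ [] := by simpa using hA
  have hlen : PySem.List.len A = PySem.List.len (A.map (fun r => r.take A.length)) := by
    simp [PySem.List.len_eq]
  rw [check_eq_fold A]
  rw [PySem.List.foldl_congr_mem _ _
      (fun ans i => max ans (max (Mrow (A.map (fun r => r.take A.length)) i)
        (Mcol (A.map (fun r => r.take A.length)) i))) 1
      (fun acc i hi => by
        have hm := (PySem.List.mem_pyRange_one).mp hi
        show max acc (max (Mrow A i) (Mcol A i))
            = max acc (max (Mrow (A.map (fun r => r.take A.length)) i)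
                (Mcol (A.map (fun r => r.take A.length)) i))
        rw [Mrow_take A hrows i hm.1 hm.2, Mcol_take A hrows i hm.1 hm.2])]
  rw [hlen, foldl_max_pair, rows_eq _ hsq, cols_eq _ hsq hWne, check_alt_eq A]
  omega

-- ===== VERDICT (by name: the statement is the Claim_ definition above) =====
theorem check_spec : Claim_equal_check := by
  intro A _ hpre
  unfold Spec_check
  by_cases hA : A = []
  · subst hA; decide
  · by_cases h2 : 2 ≤ A.length
    · exact check_eq_alt_of_rows A hA (hpre h2)
    · -- a single row: A returns 1 without reading anything; B scans the clipped 1×1 board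
      match A, hA with
      | [r], _ =>
        have hc : check [r] = 1 := by
          unfold check
          simp only [PySem.List.len_eq, List.length_cons, List.length_nil]
          norm_num [PySem.List.pyRange_one_singleton, PySem.List.pyRange_one_eq_nil]
        rw [hc]
        cases r with
        | nil => decide
        | cons x t =>
          simp [check_alt, zipStar, zipGo, scanLine, scanGo, countPrefix]
      | r1 :: r2 :: t, _ => simp at h2
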